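-- pv_equiv track=rewrite | github.com/sotelop13/network-topology-editor | network_editor.py | generate_links_subnets
-- ===== SOURCE A (Python) =====
-- def generate_links_subnets(num_subnets, hosts_per_subnet):
--     links = []
--     host_id = 1
--
--     for subnet_id in range(1, num_subnets + 1):
--         switch = "s" + str(subnet_id)
--         for _ in range(hosts_per_subnet):
--             host = "h" + str(host_id)
--             links.append([host, switch])
--             host_id += 1
--
--     # Central switch
--     central_switch = f"s{num_subnets + 1}"
--     for subnet_id in range(1, num_subnets + 1):
--         links.append([f"s{subnet_id}", central_switch])
--
--     return links
-- ===== SOURCE B (Python) =====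
-- def generate_links_subnets(num_subnets, hosts_per_subnet):
--     # Single flat pass over global host numbers 1..total; the owning switch of
--     # host k is recovered arithmetically as (k-1)//hosts_per_subnet + 1.
--     total = max(num_subnets, 0) * max(hosts_per_subnet, 0)
--     central = "s" + str(num_subnets + 1)
--     return ([["h" + str(k), "s" + str((k - 1) // hosts_per_subnet + 1)]
--              for k in range(1, total + 1)]
--             + [["s" + str(i), central] for i in range(1, num_subnets + 1)])
-- ===== Notes on version B (the rewrite author's own statement) =====
-- stated objective: alternative
-- what changed: Replaces A's nested subnet/host loops with a running host_id counter by one flat loop over global host numbers 1..num_subnets*hosts_per_subnet, recovering each host's switch arithmetically via floor division (k-1)//hosts_per_subnet + 1; uplinks are a second flat pass.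
import Mathlib
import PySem

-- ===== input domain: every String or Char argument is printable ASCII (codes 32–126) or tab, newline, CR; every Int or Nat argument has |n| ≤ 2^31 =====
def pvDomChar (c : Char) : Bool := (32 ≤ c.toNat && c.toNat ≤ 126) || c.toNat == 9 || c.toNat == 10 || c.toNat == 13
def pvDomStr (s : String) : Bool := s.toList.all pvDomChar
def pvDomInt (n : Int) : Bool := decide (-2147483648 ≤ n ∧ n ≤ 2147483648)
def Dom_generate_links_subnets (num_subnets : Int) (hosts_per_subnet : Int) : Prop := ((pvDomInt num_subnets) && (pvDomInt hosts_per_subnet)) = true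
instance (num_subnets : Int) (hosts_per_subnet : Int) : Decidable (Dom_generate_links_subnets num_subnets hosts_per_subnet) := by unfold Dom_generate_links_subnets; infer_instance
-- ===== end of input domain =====

-- B replaces A's nested loops with a running host counter by one flat pass over
-- global host numbers, recovering each host's switch by floor division; same cost.

-- ===== PORT A =====
def generate_links_subnets (num_subnets : Int) (hosts_per_subnet : Int) : List (List String) :=
  let st :=
    (PySem.List.pyRange 1 (num_subnets + 1) 1).foldl
      (fun (st : List (List String) × Int) subnet_id =>
        let switch := "s" ++ PySem.Int.toStr subnet_id
        (PySem.List.pyRange 0 hosts_per_subnet 1).foldl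
          (fun (st2 : List (List String) × Int) _ =>
            let host := "h" ++ PySem.Int.toStr st2.2
            (st2.1 ++ [[host, switch]], st2.2 + 1)) st)
      ([], 1)
  let central_switch := "s" ++ PySem.Int.toStr (num_subnets + 1)
  (PySem.List.pyRange 1 (num_subnets + 1) 1).foldl
    (fun links subnet_id => links ++ [["s" ++ PySem.Int.toStr subnet_id, central_switch]]) st.1

-- ===== PORT B =====
def generate_links_subnets_alt (num_subnets : Int) (hosts_per_subnet : Int) : List (List String) :=
  let total := max num_subnets 0 * max hosts_per_subnet 0
  let central := "s" ++ PySem.Int.toStr (num_subnets + 1)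
  ((PySem.List.pyRange 1 (total + 1) 1).map (fun k =>
    ["h" ++ PySem.Int.toStr k,
     "s" ++ PySem.Int.toStr (PySem.Int.floordiv (k - 1) hosts_per_subnet + 1)]))
  ++ (PySem.List.pyRange 1 (num_subnets + 1) 1).map (fun i =>
       ["s" ++ PySem.Int.toStr i, central])

-- ===== PRECONDITION & SPEC =====
def Spec_generate_links_subnets (num_subnets : Int) (hosts_per_subnet : Int) (out : List (List String)) : Prop := out = generate_links_subnets_alt num_subnets hosts_per_subnet
instance (num_subnets : Int) (hosts_per_subnet : Int) (out : List (List String)) : Decidable (Spec_generate_links_subnets num_subnets hosts_per_subnet out) := by unfold Spec_generate_links_subnets; infer_instance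

-- ===== CLAIM =====
def Claim_equal_generate_links_subnets : Prop := ∀ (num_subnets : Int) (hosts_per_subnet : Int), Dom_generate_links_subnets num_subnets hosts_per_subnet → Spec_generate_links_subnets num_subnets hosts_per_subnet (generate_links_subnets num_subnets hosts_per_subnet)

-- ===== LEMMAS AND PROOFS =====

-- A's inner loop: appends one host link per iteration, advancing the counter.
lemma inner_loop (sw : String) (xs : List Int) (ls : List (List String)) (h0 : Int) :
    xs.foldl
      (fun (st2 : List (List String) × Int) _ =>
        (st2.1 ++ [["h" ++ PySem.Int.toStr st2.2, sw]], st2.2 + 1)) (ls, h0)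
    = (ls ++ (PySem.List.pyRange h0 (h0 + xs.length) 1).map
        (fun i => ["h" ++ PySem.Int.toStr i, sw]), h0 + xs.length) := by
  induction xs generalizing ls h0 with
  | nil => simp [PySem.List.pyRange_one_eq_nil]
  | cons x xs ih =>
    rw [List.foldl_cons, ih]
    have hb : h0 + (((x :: xs).length : Nat) : Int) = (h0 + 1) + ((xs.length : Nat) : Int) := by
      simp; omega
    rw [hb]
    have hc : PySem.List.pyRange h0 ((h0 + 1) + (xs.length : Int)) 1
        = h0 :: PySem.List.pyRange (h0 + 1) ((h0 + 1) + (xs.length : Int)) 1 :=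
      PySem.List.pyRange_one_cons (by omega)
    rw [hc]
    simp

-- A's outer host loop: the counter after m subnets is m*h+1 and the links so far
-- are exactly host numbers 1..m*h, each labelled with its switch by floor division.
lemma outer_loop (h : Int) (hp : 0 < h) (n : Nat) :
    (PySem.List.pyRange 1 ((n : Int) + 1) 1).foldl
      (fun (st : List (List String) × Int) subnet_id =>
        (PySem.List.pyRange 0 h 1).foldl
          (fun (st2 : List (List String) × Int) _ =>
            (st2.1 ++ [["h" ++ PySem.Int.toStr st2.2, "s" ++ PySem.Int.toStr subnet_id]], st2.2 + 1)) st)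
      ([], 1)
    = ((PySem.List.pyRange 1 ((n : Int) * h + 1) 1).map (fun k =>
        ["h" ++ PySem.Int.toStr k,
         "s" ++ PySem.Int.toStr (PySem.Int.floordiv (k - 1) h + 1)]), (n : Int) * h + 1) := by
  have hlen : ((PySem.List.pyRange 0 h 1).length : Int) = h := by
    rw [PySem.List.length_pyRange_one]; omega
  induction n with
  | zero => simp [PySem.List.pyRange_one_eq_nil]
  | succ m ih =>
    have hsplit : PySem.List.pyRange 1 ((m : Int) + 1 + 1) 1
        = PySem.List.pyRange 1 ((m : Int) + 1) 1 ++ [(m : Int) + 1] :=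
      PySem.List.pyRange_one_succ_right (by omega)
    rw [show ((m + 1 : Nat) : Int) = (m : Int) + 1 by push_cast; ring] at *
    rw [hsplit, List.foldl_append, ih, List.foldl_cons, List.foldl_nil, inner_loop]
    have hblock : PySem.List.pyRange 1 (((m : Int) + 1) * h + 1) 1
        = PySem.List.pyRange 1 ((m : Int) * h + 1) 1
          ++ PySem.List.pyRange ((m : Int) * h + 1) (((m : Int) + 1) * h + 1) 1 :=
      PySem.List.pyRange_one_append _ _ _ (by nlinarith) (by nlinarith)
    refine Prod.ext ?_ ?_
    · rw [hlen, hblock, List.map_append]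
      have hmap : List.map (fun i => ["h" ++ PySem.Int.toStr i, "s" ++ PySem.Int.toStr ((m : Int) + 1)])
            (PySem.List.pyRange ((m : Int) * h + 1) (((m : Int) + 1) * h + 1) 1)
          = List.map (fun k => ["h" ++ PySem.Int.toStr k,
              "s" ++ PySem.Int.toStr (PySem.Int.floordiv (k - 1) h + 1)])
            (PySem.List.pyRange ((m : Int) * h + 1) (((m : Int) + 1) * h + 1) 1) := by
        apply List.map_congr_left
        intro k hk
        rw [PySem.List.mem_pyRange_one] at hk
        have hf : PySem.Int.floordiv (k - 1) h = (m : Int) := by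
          rw [PySem.Int.floordiv_eq_iff_of_pos hp]
          constructor <;> nlinarith [hk.1, hk.2]
        rw [hf]
      rw [show ((m : Int) + 1) * h + 1 = (m : Int) * h + 1 + h by ring] at hmap
      rw [hmap, show ((m : Int) + 1) * h + 1 = (m : Int) * h + 1 + h by ring]
    · rw [hlen]; ring
  -- end outer_loop

-- ===== VERDICT =====
theorem generate_links_subnets_spec : Claim_equal_generate_links_subnets := by
  intro n h _
  unfold Spec_generate_links_subnets generate_links_subnets generate_links_subnets_alt
  simp only [PySem.List.foldl_append_singleton_eq_map]
  congr 1
  by_cases hh : h ≤ 0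
  · have he : PySem.List.pyRange 0 h 1 = [] := PySem.List.pyRange_one_eq_nil hh
    have ht : max n 0 * max h 0 = 0 := by
      rw [show max h 0 = 0 by omega]; ring
    simp [he, ht, PySem.List.pyRange_one_eq_nil (le_refl (1:Int))]
  · rw [not_le] at hh
    by_cases hn : n ≤ 0
    · have h1 : PySem.List.pyRange 1 (n + 1) 1 = [] :=
        PySem.List.pyRange_one_eq_nil (by omega)
      have ht : max n 0 * max h 0 = 0 := by
        rw [show max n 0 = 0 by omega]; ring
      simp [h1, ht, PySem.List.pyRange_one_eq_nil (le_refl (1:Int))]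
    · rw [not_le] at hn
      obtain ⟨m, rfl⟩ := Int.eq_ofNat_of_zero_le hn.le
      have ht : max ((m : Nat) : Int) 0 * max h 0 = (m : Int) * h := by
        rw [show max ((m : Nat) : Int) 0 = (m : Int) by omega, show max h 0 = h by omega]
      rw [ht]
      exact congrArg Prod.fst (outer_loop h hh m)
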